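-- pv_equiv track=rewrite | github.com/baptjl/final_project | final-project_finmod-main/src/finmod/modeler.py | _find_row_by_label
-- ===== SOURCE A (Python) =====
-- from typing import Dict, Iterable, List, Mapping, MutableMapping, Tuple
--
-- def _norm_label(text: str) -> str:
--     """Normalize label text for loose matching (collapse whitespace, lower-case)."""
--     return " ".join(text.split()).lower()
--
-- def _find_row_by_label(
--     grid: Mapping[int, Mapping[str, str]], label: str, label_col: str = "C"
-- ) -> Mapping[str, str]:
--     target = _norm_label(label)
--     for _, cols in sorted(grid.items()):
--         if _norm_label(str(cols.get(label_col, ""))) == target: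
--             return cols
--     raise KeyError(f"Label '{label}' not found in column {label_col}.")
-- ===== SOURCE B (Python) =====
-- def _norm_label(text: str) -> str:
--     """Normalize label text for loose matching (collapse whitespace, lower-case)."""
--     return " ".join(text.split()).lower()
--
-- def _find_row_by_label(grid, label, label_col="C"):
--     target = _norm_label(label)
--     best_key = None
--     best_cols = None
--     for k, cols in grid.items():
--         if _norm_label(str(cols.get(label_col, ""))) == target and (best_key is None or k < best_key):
--             best_key, best_cols = k, cols
--     if best_cols is None:
--         raise KeyError(f"Label '{label}' not found in column {label_col}.")
--     return best_cols
-- ===== Notes on version B (the rewrite author's own statement) =====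
-- stated objective: faster
-- what changed: Replaces sort-the-items-then-scan-for-first-match by a single unsorted pass that tracks the matching row with the smallest key.
import Mathlib
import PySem

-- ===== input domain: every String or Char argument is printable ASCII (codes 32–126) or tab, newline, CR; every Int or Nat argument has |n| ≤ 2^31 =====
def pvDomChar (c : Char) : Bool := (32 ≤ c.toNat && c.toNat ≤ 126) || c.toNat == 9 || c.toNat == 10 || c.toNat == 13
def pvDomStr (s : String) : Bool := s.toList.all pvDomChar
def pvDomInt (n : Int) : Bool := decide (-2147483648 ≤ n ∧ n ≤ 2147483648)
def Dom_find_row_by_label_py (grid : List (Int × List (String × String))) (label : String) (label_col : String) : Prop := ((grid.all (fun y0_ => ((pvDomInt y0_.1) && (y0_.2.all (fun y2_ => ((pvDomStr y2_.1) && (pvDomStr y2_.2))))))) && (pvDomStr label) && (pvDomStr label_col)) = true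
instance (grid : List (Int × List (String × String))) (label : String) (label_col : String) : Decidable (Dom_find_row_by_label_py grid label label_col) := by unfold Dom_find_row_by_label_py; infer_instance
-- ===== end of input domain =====

-- B replaces A's sort-then-scan-for-first-match by one unsorted pass tracking the
-- matching row with the smallest key (objective: faster, O(n) vs O(n log n)).

-- _norm_label: " ".join(text.split()).lower()
def pvNorm (text : String) : String :=
  PySem.Str.lower (PySem.Str.join " " (PySem.Str.split₀ text))

-- cols.get(label_col, "") on the association-list representation (first match)
def pvGetD (cols : List (String × String)) (k dflt : String) : String :=
  match cols.find? (fun p => p.1 == k) with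
  | some p => p.2
  | none => dflt

-- ===== PORT A =====
-- A's scan loop: for _, cols in <sorted items>: if _norm_label(str(cols.get(label_col, ""))) == target: return cols
def pvGoA (target label_col : String) : List (Int × List (String × String)) → List (String × String)
  | [] => []          -- the loop fell through: Python raises KeyError; excluded by Pre_
  | p :: t => if pvNorm (pvGetD p.2 label_col "") == target then p.2 else pvGoA target label_col t

def find_row_by_label_py (grid : List (Int × List (String × String))) (label : String) (label_col : String) : List (String × String) :=
  let target := pvNorm label
  pvGoA target label_col (PySem.List.sorted grid (fun p => p.1) false)

-- ===== PORT B =====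
-- B's single pass: keep (best_key, best_cols), replace when a match has a strictly smaller key
def find_row_by_label_py_alt (grid : List (Int × List (String × String))) (label : String) (label_col : String) : List (String × String) :=
  let target := pvNorm label
  match grid.foldl (fun acc p =>
      if (pvNorm (pvGetD p.2 label_col "") == target) &&
         (match acc with | none => true | some q => decide (p.1 < q.1))
      then some p else acc) none with
  | some m => m.2
  | none => []        -- best_cols is None: Python raises KeyError; excluded by Pre_

-- ===== PRECONDITION & SPEC =====
-- Pre_ excludes (a) inputs with no matching row, where A raises KeyError, and (b) lists with
-- duplicate outer keys, which do not represent a Python dict (dict construction collapses them).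
def Pre_find_row_by_label_py (grid : List (Int × List (String × String))) (label : String) (label_col : String) : Prop :=
  (grid.map (fun p => p.1)).Nodup ∧ ∃ r ∈ grid, pvNorm (pvGetD r.2 label_col "") = pvNorm label

instance (grid : List (Int × List (String × String))) (label : String) (label_col : String) : Decidable (Pre_find_row_by_label_py grid label label_col) := by unfold Pre_find_row_by_label_py; infer_instance

def pvWitness_find_row_by_label_py : (List (Int × List (String × String))) × String × String :=
  ([(0, [("C", "x")])], "x", "C")

def Spec_find_row_by_label_py (grid : List (Int × List (String × String))) (label : String) (label_col : String) (out : List (String × String)) : Prop := out = find_row_by_label_py_alt grid label label_col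
instance (grid : List (Int × List (String × String))) (label : String) (label_col : String) (out : List (String × String)) : Decidable (Spec_find_row_by_label_py grid label label_col out) := by unfold Spec_find_row_by_label_py; infer_instance

-- ===== CLAIM (what is proved, stated in full; the proofs are below) =====
def Claim_equal_find_row_by_label_py : Prop := ∀ (grid : List (Int × List (String × String))) (label : String) (label_col : String), Dom_find_row_by_label_py grid label label_col → Pre_find_row_by_label_py grid label label_col → Spec_find_row_by_label_py grid label label_col (find_row_by_label_py grid label label_col)

-- ===== LEMMAS AND PROOFS =====

-- abbreviations used only by the proofs
def pvPred (target label_col : String) (p : Int × List (String × String)) : Bool :=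
  pvNorm (pvGetD p.2 label_col "") == target

def pvStep (target label_col : String)
    (acc : Option (Int × List (String × String))) (p : Int × List (String × String)) :
    Option (Int × List (String × String)) :=
  if (pvNorm (pvGetD p.2 label_col "") == target) &&
     (match acc with | none => true | some q => decide (p.1 < q.1))
  then some p else acc

theorem pvStep_none (target label_col : String) (p : Int × List (String × String)) :
    pvStep target label_col none p = if pvPred target label_col p then some p else none := by
  simp [pvStep, pvPred]

theorem pvStep_some (target label_col : String) (a p : Int × List (String × String)) :
    pvStep target label_col (some a) p =
      if pvPred target label_col p && decide (p.1 < a.1) then some p else some a := by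
  simp [pvStep, pvPred]

-- A's loop on a ≤-sorted list returns the matching row of minimal key
theorem pvGoA_spec (target label_col : String) (s : List (Int × List (String × String)))
    (hsort : s.Pairwise (fun a b => a.1 ≤ b.1))
    (hex : ∃ r ∈ s, pvPred target label_col r = true) :
    ∃ m ∈ s, pvPred target label_col m = true ∧
      (∀ q ∈ s, pvPred target label_col q = true → m.1 ≤ q.1) ∧
      pvGoA target label_col s = m.2 := by
  induction s with
  | nil => simp at hex
  | cons x t ih =>
    by_cases hx : (pvNorm (pvGetD x.2 label_col "") == target) = true
    · refine ⟨x, List.mem_cons_self, hx, ?_, ?_⟩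
      · intro q hq _
        rcases List.mem_cons.mp hq with h | h
        · simp [h]
        · exact (List.pairwise_cons.mp hsort).1 q h
      · simp only [pvGoA, if_pos hx]
    · have hex' : ∃ r ∈ t, pvPred target label_col r = true := by
        rcases hex with ⟨r, hr, hpr⟩
        rcases List.mem_cons.mp hr with h | h
        · exact absurd (h ▸ hpr) hx
        · exact ⟨r, h, hpr⟩
      rcases ih (List.pairwise_cons.mp hsort).2 hex' with ⟨m, hm, hpm, hmin, heq⟩
      refine ⟨m, List.mem_cons_of_mem _ hm, hpm, ?_, ?_⟩
      · intro q hq hpq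
        rcases List.mem_cons.mp hq with h | h
        · exact absurd (h ▸ hpq) hx
        · exact hmin q h hpq
      · simp only [pvGoA, if_neg hx]
        exact heq

-- B's fold: soundness of the accumulator
theorem pvFold_sound (target label_col : String) (l : List (Int × List (String × String))) :
    ∀ acc m, l.foldl (pvStep target label_col) acc = some m →
      (m ∈ l ∧ pvPred target label_col m = true) ∨ acc = some m := by
  induction l with
  | nil => intro acc m h; exact Or.inr h
  | cons x t ih =>
    intro acc m h
    simp only [List.foldl_cons] at h
    rcases ih _ m h with ⟨hm, hpm⟩ | hacc
    · exact Or.inl ⟨List.mem_cons_of_mem _ hm, hpm⟩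
    · cases acc with
      | none =>
        rw [pvStep_none] at hacc
        cases hpx : pvPred target label_col x with
        | true => rw [if_pos hpx] at hacc; cases hacc; exact Or.inl ⟨List.mem_cons_self, hpx⟩
        | false => rw [hpx] at hacc; simp at hacc
      | some a =>
        rw [pvStep_some] at hacc
        cases hc : (pvPred target label_col x && decide (x.1 < a.1)) with
        | true =>
          rw [hc, if_pos rfl] at hacc
          cases hacc
          exact Or.inl ⟨List.mem_cons_self, (Bool.and_eq_true _ _).mp hc |>.1⟩
        | false => rw [hc] at hacc; simp at hacc; exact Or.inr (by rw [hacc])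

-- B's fold returns none only from a none accumulator with no match in the list
theorem pvFold_none (target label_col : String) (l : List (Int × List (String × String))) :
    ∀ acc, l.foldl (pvStep target label_col) acc = none →
      acc = none ∧ ∀ x ∈ l, pvPred target label_col x = false := by
  induction l with
  | nil => intro acc h; exact ⟨h, by simp⟩
  | cons x t ih =>
    intro acc h
    simp only [List.foldl_cons] at h
    rcases ih _ h with ⟨hstep, hall⟩
    cases acc with
    | none =>
      rw [pvStep_none] at hstep
      cases hpx : pvPred target label_col x with
      | true => rw [if_pos hpx] at hstep; simp at hstep
      | false =>
        refine ⟨rfl, ?_⟩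
        intro y hy
        rcases List.mem_cons.mp hy with rfl | hyt
        · exact hpx
        · exact hall y hyt
    | some a =>
      exfalso
      rw [pvStep_some] at hstep
      cases hc : (pvPred target label_col x && decide (x.1 < a.1)) with
      | true => rw [hc, if_pos rfl] at hstep; simp at hstep
      | false => rw [hc] at hstep; simp at hstep

-- B's fold: the accumulator key never increases
theorem pvFold_key_mono (target label_col : String) (l : List (Int × List (String × String))) :
    ∀ a m, l.foldl (pvStep target label_col) (some a) = some m → m.1 ≤ a.1 := by
  induction l with
  | nil => intro a m h; cases h; exact le_refl _
  | cons x t ih =>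
    intro a m h
    simp only [List.foldl_cons] at h
    rw [pvStep_some] at h
    cases hc : (pvPred target label_col x && decide (x.1 < a.1)) with
    | true =>
      rw [hc, if_pos rfl] at h
      have hlt : x.1 < a.1 := by
        have := (Bool.and_eq_true _ _).mp hc |>.2
        exact of_decide_eq_true this
      exact le_of_lt (lt_of_le_of_lt (ih x m h) hlt)
    | false =>
      rw [hc] at h; simp at h
      exact ih a m h

-- B's fold: the result key is ≤ the key of every matching element of the list
theorem pvFold_min (target label_col : String) (l : List (Int × List (String × String))) :
    ∀ acc m, l.foldl (pvStep target label_col) acc = some m →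
      ∀ q ∈ l, pvPred target label_col q = true → m.1 ≤ q.1 := by
  induction l with
  | nil => intro acc m _ q hq; simp at hq
  | cons x t ih =>
    intro acc m h q hq hpq
    simp only [List.foldl_cons] at h
    rcases List.mem_cons.mp hq with rfl | hqt
    · cases acc with
      | none =>
        rw [pvStep_none, if_pos hpq] at h
        exact pvFold_key_mono target label_col t q m h
      | some a =>
        rw [pvStep_some] at h
        cases hlt : decide (q.1 < a.1) with
        | true =>
          rw [hpq, hlt] at h; simp at h
          exact pvFold_key_mono target label_col t q m h
        | false =>
          have hax : a.1 ≤ q.1 := le_of_not_gt (of_decide_eq_false hlt)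
          rw [hpq, hlt] at h; simp at h
          exact le_trans (pvFold_key_mono target label_col t a m h) hax
    · exact ih _ m h q hqt hpq

-- unique minimal match under nodup keys
theorem pv_unique_min (grid : List (Int × List (String × String)))
    (hnd : (grid.map (fun p => p.1)).Nodup)
    (m m' : Int × List (String × String))
    (hm : m ∈ grid) (hm' : m' ∈ grid)
    (h1 : m.1 ≤ m'.1) (h2 : m'.1 ≤ m.1) : m = m' :=
  List.inj_on_of_nodup_map hnd hm hm' (le_antisymm h1 h2)

-- ===== VERDICT (by name: the statement is the Claim_ definition above) =====
theorem find_row_by_label_py_spec : Claim_equal_find_row_by_label_py := by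
  intro grid label label_col _ hpre
  rcases hpre with ⟨hnd, r, hr, hpr⟩
  unfold Spec_find_row_by_label_py find_row_by_label_py find_row_by_label_py_alt
  change pvGoA (pvNorm label) label_col (PySem.List.sorted grid (fun p => p.1) false) =
    match grid.foldl (pvStep (pvNorm label) label_col) none with
    | some m => m.2
    | none => []
  have hprB : pvPred (pvNorm label) label_col r = true := by
    simp only [pvPred, beq_iff_eq]; exact hpr
  have hperm : (PySem.List.sorted grid (fun p => p.1) false).Perm grid :=
    PySem.List.sorted_perm grid (fun p => p.1) false
  have hexs : ∃ x ∈ PySem.List.sorted grid (fun p => p.1) false, pvPred (pvNorm label) label_col x = true :=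
    ⟨r, (PySem.List.mem_sorted grid (fun p => p.1) false r).mpr hr, hprB⟩
  rcases pvGoA_spec (pvNorm label) label_col _ (PySem.List.sorted_pairwise grid (fun p => p.1)) hexs
    with ⟨mA, hmA, hpA, hminA, heqA⟩
  cases hB : grid.foldl (pvStep (pvNorm label) label_col) none with
  | none =>
    exfalso
    have := (pvFold_none (pvNorm label) label_col grid none hB).2 r hr
    rw [hprB] at this; exact Bool.true_eq_false.mp this
  | some mB =>
    have hmB : mB ∈ grid ∧ pvPred (pvNorm label) label_col mB = true := by
      rcases pvFold_sound (pvNorm label) label_col grid none mB hB with h | h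
      · exact h
      · exact absurd h (by simp)
    have hminB : ∀ q ∈ grid, pvPred (pvNorm label) label_col q = true → mB.1 ≤ q.1 :=
      pvFold_min (pvNorm label) label_col grid none mB hB
    have hmA' : mA ∈ grid := hperm.mem_iff.mp hmA
    have h1 : mA.1 ≤ mB.1 := hminA mB (hperm.mem_iff.mpr hmB.1) hmB.2
    have h2 : mB.1 ≤ mA.1 := hminB mA hmA' hpA
    rw [heqA, pv_unique_min grid hnd mA mB hmA' hmB.1 h1 h2]
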